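-- pv_equiv track=rewrite | github.com/jsichel2006/github-star-tracker | backend/convert_and_sort_star_history.py | convert_to_cumulative
-- ===== SOURCE A (Python) =====
-- def convert_to_cumulative(daily_deltas, current_count):
--     cumulative = []
--     running_total = current_count
--     for date, delta in reversed(daily_deltas):
--         if delta is None:
--             cumulative.append((date, None))
--         else:
--             running_total -= delta
--             cumulative.append((date, running_total))
--     cumulative.reverse()
--     return cumulative
-- ===== SOURCE B (Python) =====
-- def convert_to_cumulative(daily_deltas, current_count):
--     # pass 1: exclusive prefix sums of the non-None deltas (prefixes[i] = sum before entry i)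
--     prefixes = [0]
--     total = 0
--     for _, delta in daily_deltas:
--         if delta is not None:
--             total += delta
--         prefixes.append(total)
--     base = current_count - total
--     # pass 2: pair each entry with its prefix; value[i] = base + prefixes[i]
--     return [(date, None if delta is None else base + pre)
--             for (date, delta), pre in zip(daily_deltas, prefixes)]
-- ===== Notes on version B (the rewrite author's own statement) =====
-- stated objective: alternative
-- what changed: Replaces A's backward pass (reversed iteration subtracting a running total, then a final list reverse) with a two-pass forward construction: one pass builds the exclusive prefix-sum table of non-None deltas, then a comprehension over zip(daily_deltas, prefixes) emits each value as (current_count - total) + prefix, with no reversal and no running mutation during output.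
import Mathlib
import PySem

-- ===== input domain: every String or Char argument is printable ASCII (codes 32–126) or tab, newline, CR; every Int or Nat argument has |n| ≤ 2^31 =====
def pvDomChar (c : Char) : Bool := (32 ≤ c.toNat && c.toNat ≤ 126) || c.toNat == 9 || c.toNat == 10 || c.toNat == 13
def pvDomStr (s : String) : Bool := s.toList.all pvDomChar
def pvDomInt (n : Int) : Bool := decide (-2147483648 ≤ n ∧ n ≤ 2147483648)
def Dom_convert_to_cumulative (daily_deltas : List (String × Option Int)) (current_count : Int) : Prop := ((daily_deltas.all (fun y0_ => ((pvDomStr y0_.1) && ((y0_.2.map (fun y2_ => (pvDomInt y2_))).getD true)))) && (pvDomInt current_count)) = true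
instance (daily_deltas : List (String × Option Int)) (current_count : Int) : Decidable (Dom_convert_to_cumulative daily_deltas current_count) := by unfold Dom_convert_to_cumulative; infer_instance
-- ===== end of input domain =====

-- B replaces A's reversed running-subtraction pass (plus final reverse) with a forward two-pass
-- construction: a prefix-sum table, then a map over the list zipped with it; same cost (alternative).

-- ===== PORT A =====
-- A's loop over reversed(daily_deltas) carrying (running_total, cumulative) with list append,
-- then cumulative.reverse().
def convert_to_cumulative (daily_deltas : List (String × Option Int)) (current_count : Int) : List (String × Option Int) :=
  let st := daily_deltas.reverse.foldl
    (fun (st : Int × List (String × Option Int)) p =>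
      match p.2 with
      | none => (st.1, st.2 ++ [(p.1, (none : Option Int))])
      | some k => (st.1 - k, st.2 ++ [(p.1, some (st.1 - k))]))
    (current_count, [])
  st.2.reverse

-- ===== PORT B =====
-- B's first pass: build the exclusive prefix-sum table `prefixes` (state: running total × table).
-- B's second pass: list comprehension over zip(daily_deltas, prefixes).
def convert_to_cumulative_alt (daily_deltas : List (String × Option Int)) (current_count : Int) : List (String × Option Int) :=
  let st := daily_deltas.foldl
    (fun (st : Int × List Int) p =>
      let total := match p.2 with | none => st.1 | some k => st.1 + k
      (total, st.2 ++ [total]))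
    (0, [0])
  let base := current_count - st.1
  (daily_deltas.zip st.2).map
    (fun q => (q.1.1, match q.1.2 with | none => none | some _ => some (base + q.2)))

-- ===== PRECONDITION & SPEC =====
def Spec_convert_to_cumulative (daily_deltas : List (String × Option Int)) (current_count : Int) (out : List (String × Option Int)) : Prop := out = convert_to_cumulative_alt daily_deltas current_count
instance (daily_deltas : List (String × Option Int)) (current_count : Int) (out : List (String × Option Int)) : Decidable (Spec_convert_to_cumulative daily_deltas current_count out) := by unfold Spec_convert_to_cumulative; infer_instance

-- ===== CLAIM (what is proved, stated in full; the proofs are below) =====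
def Claim_equal_convert_to_cumulative : Prop := ∀ (daily_deltas : List (String × Option Int)) (current_count : Int), Dom_convert_to_cumulative daily_deltas current_count → Spec_convert_to_cumulative daily_deltas current_count (convert_to_cumulative daily_deltas current_count)

-- ===== LEMMAS AND PROOFS =====

-- sum of the non-None deltas
def pvTotal (xs : List (String × Option Int)) : Int :=
  match xs with
  | [] => 0
  | p :: t => (match p.2 with | none => 0 | some k => k) + pvTotal t

-- reference characterisation of the result: value at a non-None entry is
-- c minus the suffix sum including that entry
def pvRec (xs : List (String × Option Int)) (c : Int) : List (String × Option Int) :=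
  match xs with
  | [] => []
  | p :: t =>
    match p.2 with
    | none => (p.1, none) :: pvRec t c
    | some k => (p.1, some (c - k - pvTotal t)) :: pvRec t c

-- the inclusive prefix-sum table starting from running total t0
def pvPrefixes (xs : List (String × Option Int)) (t0 : Int) : List Int :=
  match xs with
  | [] => []
  | p :: t =>
    let t1 := match p.2 with | none => t0 | some k => t0 + k
    t1 :: pvPrefixes t t1

-- A's folded loop over the reversed list computes (c - pvTotal xs, (pvRec xs c).reverse)
theorem pvA_loop (xs : List (String × Option Int)) (c : Int) :
    xs.reverse.foldl
      (fun (st : Int × List (String × Option Int)) p =>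
        match p.2 with
        | none => (st.1, st.2 ++ [(p.1, (none : Option Int))])
        | some k => (st.1 - k, st.2 ++ [(p.1, some (st.1 - k))]))
      (c, [])
      = (c - pvTotal xs, (pvRec xs c).reverse) := by
  induction xs with
  | nil => simp [pvTotal, pvRec]
  | cons p t ih =>
    rw [List.reverse_cons, List.foldl_append, ih]
    cases h : p.2 with
    | none => simp [pvTotal, pvRec, h]
    | some k =>
      simp only [pvTotal, pvRec, h, List.foldl_cons, List.foldl_nil, List.reverse_cons]
      have h2 : c - pvTotal t - k = c - k - pvTotal t := by ring
      have h3 : c - (k + pvTotal t) = c - k - pvTotal t := by ring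
      rw [h2, h3]

theorem pvA_eq (xs : List (String × Option Int)) (c : Int) :
    convert_to_cumulative xs c = pvRec xs c := by
  unfold convert_to_cumulative
  rw [pvA_loop]
  simp

-- B's first pass builds (t0 + total, acc ++ pvPrefixes xs t0)
theorem pvB_fold (xs : List (String × Option Int)) (t0 : Int) (acc : List Int) :
    xs.foldl
      (fun (st : Int × List Int) p =>
        let total := match p.2 with | none => st.1 | some k => st.1 + k
        (total, st.2 ++ [total]))
      (t0, acc)
      = (t0 + pvTotal xs, acc ++ pvPrefixes xs t0) := by
  induction xs generalizing t0 acc with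
  | nil => simp [pvTotal, pvPrefixes]
  | cons p t ih =>
    cases h : p.2 with
    | none => simp [pvTotal, pvPrefixes, h, ih]
    | some k =>
      simp only [List.foldl_cons, h, ih, pvTotal, pvPrefixes]
      rw [Prod.mk.injEq]
      constructor
      · ring
      · simp

-- B's second pass over the list zipped with (pre :: pvPrefixes xs pre) yields pvRec at the
-- shifted base point
theorem pvB_zip (xs : List (String × Option Int)) (base pre : Int) :
    (xs.zip (pre :: pvPrefixes xs pre)).map
      (fun q => (q.1.1, match q.1.2 with | none => none | some _ => some (base + q.2)))
      = pvRec xs (base + pre + pvTotal xs) := by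
  induction xs generalizing pre with
  | nil => simp [pvRec]
  | cons p t ih =>
    cases h : p.2 with
    | none =>
      simp only [pvPrefixes, pvRec, h, List.zip_cons_cons, List.map_cons]
      rw [ih]
      simp [pvTotal, h]
    | some k =>
      simp only [pvPrefixes, pvRec, h, List.zip_cons_cons, List.map_cons, pvTotal]
      rw [ih]
      have h1 : base + (pre + k) + pvTotal t = base + pre + (k + pvTotal t) := by ring
      have h2 : base + pre + (k + pvTotal t) - k - pvTotal t = base + pre := by ring
      rw [h1, h2]

theorem pvB_eq (xs : List (String × Option Int)) (c : Int) :
    convert_to_cumulative_alt xs c = pvRec xs c := by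
  unfold convert_to_cumulative_alt
  rw [pvB_fold]
  simp only [List.singleton_append]
  rw [pvB_zip]
  simp

-- ===== VERDICT (by name: the statement is the Claim_ definition above) =====
theorem convert_to_cumulative_spec : Claim_equal_convert_to_cumulative := by
  intro xs c _
  unfold Spec_convert_to_cumulative
  rw [pvA_eq, pvB_eq]
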